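-- pv_equiv track=rewrite | github.com/ololo123321/euler | p093.py | seq_len
-- ===== SOURCE A (Python) =====
-- def seq_len(numbers):
--     if numbers[0] != 1:
--         return 0
--     k = 0
--     n0 = numbers[0]
--     for n1 in numbers[1:]:
--         if n1-n0 == 1:
--             k += 1
--             n0 = n1
--         else:
--             break
--     return k+1
-- ===== SOURCE B (Python) =====
-- def seq_len(numbers):
--     # Binary search for the largest k such that numbers[:k] == [1, 2, ..., k].
--     # The predicate is monotone (a matching prefix's prefixes also match),
--     # so the invariant good(lo) and answer <= hi is maintained.
--     lo, hi = 0, len(numbers)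
--     while lo < hi:
--         mid = (lo + hi + 1) // 2
--         if numbers[:mid] == list(range(1, mid + 1)):
--             lo = mid
--         else:
--             hi = mid - 1
--     return lo
-- ===== Notes on version B (the rewrite author's own statement) =====
-- stated objective: alternative
-- what changed: Replaces A's linear predecessor-difference scan with a binary search over prefix lengths for the largest k with numbers[:k] == list(range(1, k+1)), exploiting monotonicity of the matching-prefix predicate.
import Mathlib
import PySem

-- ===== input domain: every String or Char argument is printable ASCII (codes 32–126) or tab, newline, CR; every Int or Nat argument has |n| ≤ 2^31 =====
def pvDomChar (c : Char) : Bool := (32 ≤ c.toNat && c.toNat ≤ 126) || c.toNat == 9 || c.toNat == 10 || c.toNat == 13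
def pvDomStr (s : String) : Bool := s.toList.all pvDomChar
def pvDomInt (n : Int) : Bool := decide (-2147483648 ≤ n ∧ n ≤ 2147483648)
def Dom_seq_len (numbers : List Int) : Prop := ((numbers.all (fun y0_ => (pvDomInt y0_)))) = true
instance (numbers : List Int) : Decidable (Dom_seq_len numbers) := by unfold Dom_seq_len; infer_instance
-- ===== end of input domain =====

-- B replaces A's linear predecessor-difference scan with a binary search over prefix lengths
-- for the largest k with numbers[:k] == list(range(1, k+1)) (alternative algorithm, not faster).


-- ===== PORT A =====
-- loop `for n1 in numbers[1:]: …` with state (k, n0); early `break` returns k+1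
def seqLenLoopA : List Int → Int → Int → Int
  | [], k, _ => k + 1
  | n1 :: rest, k, n0 => if n1 - n0 == 1 then seqLenLoopA rest (k + 1) n1 else k + 1

def seq_len (numbers : List Int) : Int :=
  match numbers with
  | [] => 0  -- unreachable under Pre_seq_len: Python raises IndexError reading the first element
  | n :: rest => if n ≠ 1 then 0 else seqLenLoopA rest 0 n  -- numbers[1:] = rest

-- ===== PORT B =====
-- `while lo < hi: mid = (lo+hi+1)//2; if numbers[:mid] == list(range(1,mid+1)): lo = mid else: hi = mid-1`
def midB (lo hi : Int) : Int := PySem.Int.floordiv (lo + hi + 1) 2  -- mid = (lo + hi + 1) // 2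

def bsearchB (numbers : List Int) (lo hi : Int) : Int :=
  if h : lo < hi then
    if PySem.List.slice numbers none (some (midB lo hi)) == PySem.List.pyRange 1 (midB lo hi + 1) 1 then
      bsearchB numbers (midB lo hi) hi
    else
      bsearchB numbers lo (midB lo hi - 1)
  else lo
termination_by (hi - lo).toNat
decreasing_by
  all_goals
    have hd := PySem.Int.floordiv_eq_ediv_of_pos (a := lo + hi + 1) (show (0:Int) < 2 by norm_num)
    simp only [midB] at *
    omega

def seq_len_alt (numbers : List Int) : Int :=
  bsearchB numbers 0 (numbers.length : Int)  -- lo, hi = 0, len(numbers); return lo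

-- ===== PRECONDITION & SPEC =====
-- Pre_ excludes only the empty list, on which A raises IndexError reading its first element.
def Pre_seq_len (numbers : List Int) : Prop := numbers ≠ []
instance (numbers : List Int) : Decidable (Pre_seq_len numbers) := by unfold Pre_seq_len; infer_instance
def pvWitness_seq_len : List Int := ([1, 2, 3, 5])

def Spec_seq_len (numbers : List Int) (out : Int) : Prop := out = seq_len_alt numbers
instance (numbers : List Int) (out : Int) : Decidable (Spec_seq_len numbers out) := by unfold Spec_seq_len; infer_instance

-- ===== CLAIM (what is proved, stated in full; the proofs are below) =====
def Claim_equal_seq_len : Prop := ∀ (numbers : List Int), Dom_seq_len numbers → Pre_seq_len numbers → Spec_seq_len numbers (seq_len numbers)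

-- ===== LEMMAS AND PROOFS =====
-- Mathematical yardstick: length of the longest prefix of xs equal to e, e+1, e+2, …
def count : List Int → Int → Int
  | [], _ => 0
  | n :: t, e => if n = e then 1 + count t (e + 1) else 0

theorem count_nonneg (xs : List Int) : ∀ (e : Int), 0 ≤ count xs e := by
  induction xs with
  | nil => intro e; simp [count]
  | cons n t ih =>
    intro e
    simp only [count]
    split
    · have := ih (e + 1); omega
    · omega

theorem count_le_length (xs : List Int) : ∀ (e : Int), count xs e ≤ (xs.length : Int) := by
  induction xs with
  | nil => intro e; simp [count]
  | cons n t ih =>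
    intro e
    simp only [count, List.length_cons]
    split
    · have := ih (e + 1); push_cast; omega
    · have := count_nonneg t (e + 1); push_cast; positivity

-- A's loop computes the yardstick.
theorem seqLenLoopA_eq_count (rest : List Int) :
    ∀ (k n0 : Int), seqLenLoopA rest k n0 = k + 1 + count rest (n0 + 1) := by
  induction rest with
  | nil => intro k n0; simp [seqLenLoopA, count]
  | cons n1 t ih =>
    intro k n0
    simp only [seqLenLoopA, count, beq_iff_eq]
    by_cases h : n1 = n0 + 1
    · subst h
      rw [if_pos (by omega), if_pos rfl, ih]
      omega
    · rw [if_neg (by omega), if_neg h]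
      omega

theorem seq_len_eq_count (n : Int) (rest : List Int) :
    seq_len (n :: rest) = count (n :: rest) 1 := by
  show (if n ≠ 1 then 0 else seqLenLoopA rest 0 n) = _
  simp only [count]
  by_cases h : n = 1
  · subst h
    rw [if_neg (by simp), if_pos rfl, seqLenLoopA_eq_count]
    omega
  · rw [if_pos h, if_neg h]

-- A prefix matches e, e+1, … of length m exactly when the yardstick reaches m.
theorem take_eq_range_iff (m : Nat) : ∀ (xs : List Int) (e : Int),
    xs.take m = PySem.List.pyRange e (e + (m : Int)) 1 ↔ (m : Int) ≤ count xs e := by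
  induction m with
  | zero =>
    intro xs e
    simp [PySem.List.pyRange_one_eq_nil (le_refl e), count_nonneg]
  | succ m ih =>
    intro xs e
    rw [show e + ((m + 1 : Nat) : Int) = (e + 1) + (m : Int) by push_cast; ring,
        PySem.List.pyRange_one_cons (by omega)]
    cases xs with
    | nil =>
      simp only [List.take_nil, count]
      constructor
      · intro h; exact absurd h (by simp)
      · intro h; exfalso; push_cast at h; omega
    | cons n t =>
      simp only [List.take_succ_cons, List.cons.injEq, count]
      constructor
      · rintro ⟨rfl, htail⟩
        rw [if_pos rfl]
        have := (ih t (n + 1)).mp htail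
        push_cast; omega
      · intro h
        by_cases hne : n = e
        · subst hne
          rw [if_pos rfl] at h
          exact ⟨rfl, (ih t (n + 1)).mpr (by push_cast at h ⊢; omega)⟩
        · rw [if_neg hne] at h; exfalso; push_cast at h; omega

-- Binary-search invariant: if lo ≤ count ≤ hi (and 0 ≤ lo), the search returns count.
theorem bsearchB_eq_count (numbers : List Int) :
    ∀ (k : Nat) (lo hi : Int), (hi - lo).toNat = k → 0 ≤ lo →
      lo ≤ count numbers 1 → count numbers 1 ≤ hi →
      bsearchB numbers lo hi = count numbers 1 := by
  intro k
  induction k using Nat.strong_induction_on with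
  | _ k ih =>
    intro lo hi hk h0 hlo hhi
    rw [bsearchB]
    by_cases h : lo < hi
    · rw [dif_pos h]
      have hd : midB lo hi = (lo + hi + 1) / 2 :=
        PySem.Int.floordiv_eq_ediv_of_pos (show (0:Int) < 2 by norm_num)
      have hb : lo < midB lo hi ∧ midB lo hi ≤ hi := by rw [hd]; omega
      have hm0 : (0:Int) ≤ midB lo hi := by omega
      have hcond : (PySem.List.slice numbers none (some (midB lo hi))
            == PySem.List.pyRange 1 (midB lo hi + 1) 1) = true ↔ (midB lo hi ≤ count numbers 1) := by
        rw [beq_iff_eq, PySem.List.slice_to numbers hm0,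
            show midB lo hi + 1 = 1 + ((midB lo hi).toNat : Int) by omega,
            take_eq_range_iff (midB lo hi).toNat numbers 1]
        omega
      by_cases hc : midB lo hi ≤ count numbers 1
      · rw [if_pos (hcond.mpr hc)]
        exact ih (hi - midB lo hi).toNat (by omega) (midB lo hi) hi rfl hm0 hc hhi
      · rw [if_neg (by intro hx; exact hc (hcond.mp hx))]
        exact ih (midB lo hi - 1 - lo).toNat (by omega) lo (midB lo hi - 1) rfl h0 hlo (by omega)
    · rw [dif_neg h]; omega

-- ===== VERDICT (by name: the statement is the Claim_ definition above) =====
theorem seq_len_spec : Claim_equal_seq_len := by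
  intro numbers _ hpre
  unfold Spec_seq_len seq_len_alt
  have hb := bsearchB_eq_count numbers (numbers.length : Int).toNat 0 (numbers.length : Int)
    (by omega) (le_refl 0) (count_nonneg numbers 1) (count_le_length numbers 1)
  rw [hb]
  match numbers with
  | [] => exact absurd rfl hpre
  | n :: rest => exact seq_len_eq_count n rest
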